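-- pv_equiv track=rewrite | github.com/BenGutteridge/judge-a-book-by-its-cover | notebooks/02_mhills_ablation.py | check_error_types
-- ===== SOURCE A (Python) =====
-- def check_error_types(failed_calls: list[str]) -> dict[str, int]:
--     res = {
--         "disconnected": 0,
--         "resource_exhausted": 0,
--         "failed": 0,
--         "incomplete": 0,
--         "invalid_json_schema": 0,
--     }
--     for f in failed_calls:
--         if "Server disconnected without sending a response" in f:
--             res["disconnected"] += 1
--         elif "RESOURCE_EXHAUSTED" in f:
--             res["resource_exhausted"] += 1
--         elif "response_failed: True" in f:
--             # count as disconnected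
--             res["failed"] += 1
--         elif "response_incomplete: True" in f:
--             res["incomplete"] += 1
--         elif "invalid_json_schema: True" in f:
--             res["invalid_json_schema"] += 1
--         elif "'NoneType' object has no attribute 'parts'" in f:
--             # gemini api returned an an empty candidate due to an unfinished response, truncation etc.
--             res["incomplete"] += 1
--         elif "Failed to parse JSON" in f:
--             res["invalid_json_schema"] += 1
--         else:
--             raise NotImplementedError(f"Unknown failed call message: {f}")
--     return res
-- ===== SOURCE B (Python) =====
-- # Pattern-major staged passes: for each pattern in priority order, count its matches among
-- # the not-yet-classified strings in one pass and drop them, instead of A's per-item elif ladder.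
-- _PATTERNS = [
--     ("Server disconnected without sending a response", "disconnected"),
--     ("RESOURCE_EXHAUSTED", "resource_exhausted"),
--     ("response_failed: True", "failed"),
--     ("response_incomplete: True", "incomplete"),
--     ("invalid_json_schema: True", "invalid_json_schema"),
--     ("'NoneType' object has no attribute 'parts'", "incomplete"),
--     ("Failed to parse JSON", "invalid_json_schema"),
-- ]
--
-- def check_error_types(failed_calls: list[str]) -> dict[str, int]:
--     res = {
--         "disconnected": 0,
--         "resource_exhausted": 0,
--         "failed": 0,
--         "incomplete": 0,
--         "invalid_json_schema": 0,
--     }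
--     remaining = list(failed_calls)
--     for sub, cat in _PATTERNS:
--         res[cat] += sum(sub in f for f in remaining)
--         remaining = [f for f in remaining if sub not in f]
--     if remaining:
--         raise NotImplementedError(f"Unknown failed call message: {remaining[0]}")
--     return res
-- ===== Notes on version B (the rewrite author's own statement) =====
-- stated objective: alternative
-- what changed: Pattern-major instead of item-major: B makes one staged pass per pattern, counting that pattern's matches among the not-yet-classified strings and filtering them out, rather than A's per-item elif ladder; priority is preserved because earlier-pattern matches are removed before later patterns count.
import Mathlib
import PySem

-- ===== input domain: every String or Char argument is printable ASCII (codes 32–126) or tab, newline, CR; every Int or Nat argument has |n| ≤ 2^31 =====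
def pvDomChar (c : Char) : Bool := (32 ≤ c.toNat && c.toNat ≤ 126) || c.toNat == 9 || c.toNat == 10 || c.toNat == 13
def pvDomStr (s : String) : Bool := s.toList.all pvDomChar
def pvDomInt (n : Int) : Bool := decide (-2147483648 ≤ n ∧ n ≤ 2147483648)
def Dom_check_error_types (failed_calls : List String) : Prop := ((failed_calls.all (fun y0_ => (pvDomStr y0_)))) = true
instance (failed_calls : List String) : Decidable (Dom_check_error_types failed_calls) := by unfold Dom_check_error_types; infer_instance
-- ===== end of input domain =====

-- B counts pattern-major (one staged pass per pattern over the not-yet-classified strings)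
-- where A classifies item-major with an elif ladder; equivalence is about the return value.
-- ===== PORT A =====
def pvInit : PySem.Dict String Int :=
  PySem.Dict.ofList [("disconnected", 0), ("resource_exhausted", 0), ("failed", 0),
                     ("incomplete", 0), ("invalid_json_schema", 0)]

-- one loop body of A: the elif ladder; none = the explicit NotImplementedError (excluded by Pre_)
def pvStepA (d : PySem.Dict String Int) (f : String) : Option (PySem.Dict String Int) :=
  if PySem.Str.isIn "Server disconnected without sending a response" f then some (d.modify "disconnected" 0 (· + 1))
  else if PySem.Str.isIn "RESOURCE_EXHAUSTED" f then some (d.modify "resource_exhausted" 0 (· + 1))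
  else if PySem.Str.isIn "response_failed: True" f then some (d.modify "failed" 0 (· + 1))
  else if PySem.Str.isIn "response_incomplete: True" f then some (d.modify "incomplete" 0 (· + 1))
  else if PySem.Str.isIn "invalid_json_schema: True" f then some (d.modify "invalid_json_schema" 0 (· + 1))
  else if PySem.Str.isIn "'NoneType' object has no attribute 'parts'" f then some (d.modify "incomplete" 0 (· + 1))
  else if PySem.Str.isIn "Failed to parse JSON" f then some (d.modify "invalid_json_schema" 0 (· + 1))
  else none

def check_error_types (failed_calls : List String) : List (String × Int) :=
  match failed_calls.foldl (fun od f => od.bind (fun d => pvStepA d f)) (some pvInit) with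
  | some d => d.items
  | none => []   -- unreachable under Pre_ (Python raises NotImplementedError there)

-- ===== PORT B =====
def pvPatterns : List (String × String) :=
  [("Server disconnected without sending a response", "disconnected"),
   ("RESOURCE_EXHAUSTED", "resource_exhausted"),
   ("response_failed: True", "failed"),
   ("response_incomplete: True", "incomplete"),
   ("invalid_json_schema: True", "invalid_json_schema"),
   ("'NoneType' object has no attribute 'parts'", "incomplete"),
   ("Failed to parse JSON", "invalid_json_schema")]

-- one staged pass of B: count this pattern's matches among the remaining strings, then drop them
def pvStepB (st : PySem.Dict String Int × List String) (p : String × String) :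
    PySem.Dict String Int × List String :=
  (st.1.modify p.2 0 (· + (st.2.countP (fun f => PySem.Str.isIn p.1 f) : Int)),
   st.2.filter (fun f => !PySem.Str.isIn p.1 f))

def check_error_types_alt (failed_calls : List String) : List (String × Int) :=
  let st := pvPatterns.foldl pvStepB (pvInit, failed_calls)
  if st.2.isEmpty then st.1.items
  else []   -- unreachable under Pre_ (Python raises NotImplementedError on the leftovers)

-- ===== PRECONDITION & SPEC =====
-- Pre_ excludes exactly the inputs containing a string matched by no pattern, on which A raises NotImplementedError.
def Pre_check_error_types (failed_calls : List String) : Prop :=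
  ∀ f ∈ failed_calls,
    (PySem.Str.isIn "Server disconnected without sending a response" f ||
     PySem.Str.isIn "RESOURCE_EXHAUSTED" f ||
     PySem.Str.isIn "response_failed: True" f ||
     PySem.Str.isIn "response_incomplete: True" f ||
     PySem.Str.isIn "invalid_json_schema: True" f ||
     PySem.Str.isIn "'NoneType' object has no attribute 'parts'" f ||
     PySem.Str.isIn "Failed to parse JSON" f) = true
instance (failed_calls : List String) : Decidable (Pre_check_error_types failed_calls) := by
  unfold Pre_check_error_types; infer_instance

def pvWitness_check_error_types : List String := ["RESOURCE_EXHAUSTED: quota", "Failed to parse JSON"]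

def Spec_check_error_types (failed_calls : List String) (out : List (String × Int)) : Prop := out = check_error_types_alt failed_calls
instance (failed_calls : List String) (out : List (String × Int)) : Decidable (Spec_check_error_types failed_calls out) := by unfold Spec_check_error_types; infer_instance

-- ===== CLAIM (what is proved, stated in full; the proofs are below) =====
def Claim_equal_check_error_types : Prop := ∀ (failed_calls : List String), Dom_check_error_types failed_calls → Pre_check_error_types failed_calls → Spec_check_error_types failed_calls (check_error_types failed_calls)

-- ===== LEMMAS AND PROOFS =====
-- the literal 5-key dict with symbolic counts
def pvMk (a b c d e : Int) : PySem.Dict String Int :=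
  PySem.Dict.mk [("disconnected", a), ("resource_exhausted", b), ("failed", c),
                 ("incomplete", d), ("invalid_json_schema", e)]

-- modify on pvMk hits exactly one slot
theorem pvModD (a b c d e n : Int) : (pvMk a b c d e).modify "disconnected" 0 (· + n) = pvMk (a+n) b c d e := by
  simp [pvMk, PySem.Dict.modify, PySem.Dict.insert, PySem.Dict.getD, PySem.Dict.get?, PySem.Dict.contains]
theorem pvModR (a b c d e n : Int) : (pvMk a b c d e).modify "resource_exhausted" 0 (· + n) = pvMk a (b+n) c d e := by
  simp [pvMk, PySem.Dict.modify, PySem.Dict.insert, PySem.Dict.getD, PySem.Dict.get?, PySem.Dict.contains]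
theorem pvModF (a b c d e n : Int) : (pvMk a b c d e).modify "failed" 0 (· + n) = pvMk a b (c+n) d e := by
  simp [pvMk, PySem.Dict.modify, PySem.Dict.insert, PySem.Dict.getD, PySem.Dict.get?, PySem.Dict.contains]
theorem pvModI (a b c d e n : Int) : (pvMk a b c d e).modify "incomplete" 0 (· + n) = pvMk a b c (d+n) e := by
  simp [pvMk, PySem.Dict.modify, PySem.Dict.insert, PySem.Dict.getD, PySem.Dict.get?, PySem.Dict.contains]
theorem pvModJ (a b c d e n : Int) : (pvMk a b c d e).modify "invalid_json_schema" 0 (· + n) = pvMk a b c d (e+n) := by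
  simp [pvMk, PySem.Dict.modify, PySem.Dict.insert, PySem.Dict.getD, PySem.Dict.get?, PySem.Dict.contains]

-- the seven substring tests
def pvM1 (f : String) : Bool := PySem.Str.isIn "Server disconnected without sending a response" f
def pvM2 (f : String) : Bool := PySem.Str.isIn "RESOURCE_EXHAUSTED" f
def pvM3 (f : String) : Bool := PySem.Str.isIn "response_failed: True" f
def pvM4 (f : String) : Bool := PySem.Str.isIn "response_incomplete: True" f
def pvM5 (f : String) : Bool := PySem.Str.isIn "invalid_json_schema: True" f
def pvM6 (f : String) : Bool := PySem.Str.isIn "'NoneType' object has no attribute 'parts'" f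
def pvM7 (f : String) : Bool := PySem.Str.isIn "Failed to parse JSON" f

-- fold the literal substring tests back into their pvM names
theorem pvM1_eq (f : String) : PySem.Str.isIn "Server disconnected without sending a response" f = pvM1 f := rfl
theorem pvM2_eq (f : String) : PySem.Str.isIn "RESOURCE_EXHAUSTED" f = pvM2 f := rfl
theorem pvM3_eq (f : String) : PySem.Str.isIn "response_failed: True" f = pvM3 f := rfl
theorem pvM4_eq (f : String) : PySem.Str.isIn "response_incomplete: True" f = pvM4 f := rfl
theorem pvM5_eq (f : String) : PySem.Str.isIn "invalid_json_schema: True" f = pvM5 f := rfl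
theorem pvM6_eq (f : String) : PySem.Str.isIn "'NoneType' object has no attribute 'parts'" f = pvM6 f := rfl
theorem pvM7_eq (f : String) : PySem.Str.isIn "Failed to parse JSON" f = pvM7 f := rfl

-- first-match indicators (which branch of A's ladder fires)
def pvQ2 (f : String) : Bool := !pvM1 f && pvM2 f
def pvQ3 (f : String) : Bool := !pvM1 f && !pvM2 f && pvM3 f
def pvQ4 (f : String) : Bool := !pvM1 f && !pvM2 f && !pvM3 f && pvM4 f
def pvQ5 (f : String) : Bool := !pvM1 f && !pvM2 f && !pvM3 f && !pvM4 f && pvM5 f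
def pvQ6 (f : String) : Bool := !pvM1 f && !pvM2 f && !pvM3 f && !pvM4 f && !pvM5 f && pvM6 f
def pvQ7 (f : String) : Bool := !pvM1 f && !pvM2 f && !pvM3 f && !pvM4 f && !pvM5 f && !pvM6 f && pvM7 f

theorem pvStepA_eq (a b c d e : Int) (f : String) : pvStepA (pvMk a b c d e) f =
    (if pvM1 f then some (pvMk (a+1) b c d e)
     else if pvM2 f then some (pvMk a (b+1) c d e)
     else if pvM3 f then some (pvMk a b (c+1) d e)
     else if pvM4 f then some (pvMk a b c (d+1) e)
     else if pvM5 f then some (pvMk a b c d (e+1))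
     else if pvM6 f then some (pvMk a b c (d+1) e)
     else if pvM7 f then some (pvMk a b c d (e+1))
     else none) := by
  simp only [pvStepA, pvM1, pvM2, pvM3, pvM4, pvM5, pvM6, pvM7, pvModD, pvModR, pvModF, pvModI, pvModJ]
  rfl

-- invariant of A's item-major loop: each slot ends at its start plus the first-match counts
theorem pvFoldA_inv (l : List String)
    (hPre : ∀ f ∈ l, (pvM1 f || pvM2 f || pvM3 f || pvM4 f || pvM5 f || pvM6 f || pvM7 f) = true)
    (a b c d e : Int) :
    l.foldl (fun od f => od.bind (fun d => pvStepA d f)) (some (pvMk a b c d e)) =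
    some (pvMk (a + l.countP pvM1) (b + l.countP pvQ2) (c + l.countP pvQ3)
               (d + l.countP pvQ4 + l.countP pvQ6) (e + l.countP pvQ5 + l.countP pvQ7)) := by
  induction l generalizing a b c d e with
  | nil => simp
  | cons f l ih =>
    have hf := hPre f (by simp)
    have hPre' : ∀ g ∈ l, (pvM1 g || pvM2 g || pvM3 g || pvM4 g || pvM5 g || pvM6 g || pvM7 g) = true :=
      fun g hg => hPre g (by simp [hg])
    simp only [List.foldl_cons, Option.bind_some, pvStepA_eq]
    cases hm1 : pvM1 f <;> cases hm2 : pvM2 f <;> cases hm3 : pvM3 f <;>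
      cases hm4 : pvM4 f <;> cases hm5 : pvM5 f <;> cases hm6 : pvM6 f <;> cases hm7 : pvM7 f <;>
    simp only [hm1, hm2, hm3, hm4, hm5, hm6, hm7, Bool.false_or, Bool.or_false] at hf ⊢ <;>
    first
    | exact absurd hf Bool.false_ne_true
    | (simp only [Bool.false_eq_true, if_true, if_false, ih hPre',
                  Option.some.injEq]
       simp only [pvMk, PySem.Dict.mk.injEq, List.cons.injEq, Prod.mk.injEq, and_true, true_and,
                  List.countP_cons, pvQ2, pvQ3, pvQ4, pvQ5, pvQ6, pvQ7,
                  hm1, hm2, hm3, hm4, hm5, hm6, hm7, Bool.not_true, Bool.not_false,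
                  Bool.and_true, Bool.and_false,
                  if_true, if_false, Bool.false_eq_true]
       push_cast
       omega)

-- ===== VERDICT (by name: the statement is the Claim_ definition above) =====
theorem check_error_types_spec : Claim_equal_check_error_types := by
  intro l _ hPre
  have hPre' : ∀ f ∈ l, (pvM1 f || pvM2 f || pvM3 f || pvM4 f || pvM5 f || pvM6 f || pvM7 f) = true := by
    intro f hf
    have := hPre f hf
    simpa [pvM1, pvM2, pvM3, pvM4, pvM5, pvM6, pvM7, Bool.or_assoc] using this
  unfold Spec_check_error_types check_error_types
  have hInit : pvInit = pvMk 0 0 0 0 0 := by decide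
  rw [hInit, pvFoldA_inv l hPre']
  unfold check_error_types_alt
  rw [hInit]
  simp only [pvPatterns, List.foldl_cons, List.foldl_nil, pvStepB,
             pvModD, pvModR, pvModF, pvModI, pvModJ, List.filter_filter]
  simp only [pvM1_eq, pvM2_eq, pvM3_eq, pvM4_eq, pvM5_eq, pvM6_eq, pvM7_eq]
  have hEmpty : (List.filter (fun a => !pvM7 a && (!pvM6 a && (!pvM5 a && (!pvM4 a &&
      (!pvM3 a && (!pvM2 a && !pvM1 a)))))) l).isEmpty = true := by
    rw [List.isEmpty_iff, List.filter_eq_nil_iff]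
    intro f hf
    have h := hPre' f hf
    cases hA : pvM1 f <;> cases hB : pvM2 f <;> cases hC : pvM3 f <;> cases hD : pvM4 f <;>
      cases hE : pvM5 f <;> cases hF : pvM6 f <;> cases hG : pvM7 f <;> simp_all
  rw [if_pos hEmpty]
  simp only [List.countP_filter]
  have h2 : List.countP (fun a => pvM2 a && !pvM1 a) l = List.countP pvQ2 l :=
    List.countP_congr (fun f _ => by unfold pvQ2; cases pvM1 f <;> cases pvM2 f <;> rfl)
  have h3 : List.countP (fun a => pvM3 a && (!pvM2 a && !pvM1 a)) l = List.countP pvQ3 l :=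
    List.countP_congr (fun f _ => by unfold pvQ3; cases pvM1 f <;> cases pvM2 f <;> cases pvM3 f <;> rfl)
  have h4 : List.countP (fun a => pvM4 a && (!pvM3 a && (!pvM2 a && !pvM1 a))) l = List.countP pvQ4 l :=
    List.countP_congr (fun f _ => by unfold pvQ4; cases pvM1 f <;> cases pvM2 f <;> cases pvM3 f <;> cases pvM4 f <;> rfl)
  have h5 : List.countP (fun a => pvM5 a && (!pvM4 a && (!pvM3 a && (!pvM2 a && !pvM1 a)))) l = List.countP pvQ5 l :=
    List.countP_congr (fun f _ => by unfold pvQ5; cases pvM1 f <;> cases pvM2 f <;> cases pvM3 f <;> cases pvM4 f <;> cases pvM5 f <;> rfl)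
  have h6 : List.countP (fun a => pvM6 a && (!pvM5 a && (!pvM4 a && (!pvM3 a && (!pvM2 a && !pvM1 a))))) l = List.countP pvQ6 l :=
    List.countP_congr (fun f _ => by unfold pvQ6; cases pvM1 f <;> cases pvM2 f <;> cases pvM3 f <;> cases pvM4 f <;> cases pvM5 f <;> cases pvM6 f <;> rfl)
  have h7 : List.countP (fun a => pvM7 a && (!pvM6 a && (!pvM5 a && (!pvM4 a && (!pvM3 a && (!pvM2 a && !pvM1 a)))))) l = List.countP pvQ7 l :=
    List.countP_congr (fun f _ => by unfold pvQ7; cases pvM1 f <;> cases pvM2 f <;> cases pvM3 f <;> cases pvM4 f <;> cases pvM5 f <;> cases pvM6 f <;> cases pvM7 f <;> rfl)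
  rw [h2, h3, h4, h5, h6, h7]
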